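-- pv_equiv track=rewrite | github.com/kurosakiaduma/Python-Scripts | smallSum.py | smallestSum
-- ===== SOURCE A (Python) =====
-- def smallestSum(arr: list[int], k, num) -> int:
--     smSum = 0
--     i = 0
--     crrSum = 0
--     while (i+(k-1)) < len(arr):
--         crrSum = sum(arr[i:i+k])
--         if (crrSum > num) and (crrSum < sum(arr[(i+1):(i+k+1)])):
--             smSum = crrSum
--         i+=1
--     return smSum
-- ===== SOURCE B (Python) =====
-- def smallestSum(arr: list[int], k, num) -> int:
--     n = len(arr)
--     if k <= 0:
--         return 0
--     smSum = 0
--     crrSum = sum(arr[:k])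
--     for i in range(n - k + 1):
--         nxt = arr[i + k] if i + k < n else 0
--         if crrSum > num and arr[i] < nxt:
--             smSum = crrSum
--         crrSum += nxt - arr[i]
--     return smSum
-- ===== Notes on version B (the rewrite author's own statement) =====
-- stated objective: faster
-- what changed: B maintains one sliding-window sum incrementally and compares the leaving element with the entering one, instead of A's re-summing both the current and the shifted window at every position.
-- outside the precondition, e.g. on smallestSum([-5, 3], -1, -10): A returns -5, B returns 0
import Mathlib
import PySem

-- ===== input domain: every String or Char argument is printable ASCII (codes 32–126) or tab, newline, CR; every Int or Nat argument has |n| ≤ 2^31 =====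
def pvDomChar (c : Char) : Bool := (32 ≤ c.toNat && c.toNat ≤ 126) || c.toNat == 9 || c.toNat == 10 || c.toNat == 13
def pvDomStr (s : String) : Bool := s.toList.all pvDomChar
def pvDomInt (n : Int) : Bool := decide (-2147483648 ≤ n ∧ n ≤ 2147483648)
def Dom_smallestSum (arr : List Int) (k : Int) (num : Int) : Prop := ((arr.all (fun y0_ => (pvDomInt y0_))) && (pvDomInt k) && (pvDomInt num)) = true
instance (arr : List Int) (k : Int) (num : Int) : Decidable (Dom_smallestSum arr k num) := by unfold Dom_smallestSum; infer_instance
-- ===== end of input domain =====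

-- B replaces A's per-position re-summation of both windows by one incrementally
-- maintained window sum and a single element comparison (alternative/faster objective).

-- ===== PORT A =====
-- while-loop of A as structural recursion on the remaining iterations; crrSum is
-- carried (and dead) exactly as in the Python.
def smallestSumLoop (arr : List Int) (k num i smSum crrSum : Int) : Int :=
  if _h : i + (k - 1) < (arr.length : Int) then
    let c := (PySem.List.slice arr (some i) (some (i + k))).sum
    smallestSumLoop arr k num (i + 1)
      (if c > num ∧ c < (PySem.List.slice arr (some (i + 1)) (some (i + k + 1))).sum then c
       else smSum) c
  else smSum
termination_by ((arr.length : Int) - (i + (k - 1))).toNat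
decreasing_by omega

def smallestSum (arr : List Int) (k : Int) (num : Int) : Int :=
  smallestSumLoop arr k num 0 0 0

-- ===== PORT B =====
def smallestSumStep (arr : List Int) (k num : Int) (st : Int × Int) (i : Int) : Int × Int :=
  let nxt := if i + k < (arr.length : Int) then PySem.List.pyGetD arr (i + k) 0 else 0
  (if st.2 > num ∧ PySem.List.pyGetD arr i 0 < nxt then st.2 else st.1,
   st.2 + (nxt - PySem.List.pyGetD arr i 0))

def smallestSum_alt (arr : List Int) (k : Int) (num : Int) : Int :=
  if k ≤ 0 then 0
  else
    ((PySem.List.pyRange 0 ((arr.length : Int) - k + 1) 1).foldl (smallestSumStep arr k num)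
      (0, (PySem.List.slice arr none (some k)).sum)).1

-- ===== PRECONDITION & SPEC =====
-- Pre_ excludes k ≤ 0, where a window of non-positive length is meaningless and A's
-- occasional non-zero results are an accident of Python's negative-slice clamping;
-- B returns 0 there.
def Pre_smallestSum (arr : List Int) (k : Int) (num : Int) : Prop := 1 ≤ k
instance (arr : List Int) (k : Int) (num : Int) : Decidable (Pre_smallestSum arr k num) := by
  unfold Pre_smallestSum; infer_instance

def pvWitness_smallestSum : List Int × Int × Int := ([1, 2, 3, 4], 2, 3)

def Spec_smallestSum (arr : List Int) (k : Int) (num : Int) (out : Int) : Prop := out = smallestSum_alt arr k num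
instance (arr : List Int) (k : Int) (num : Int) (out : Int) : Decidable (Spec_smallestSum arr k num out) := by unfold Spec_smallestSum; infer_instance

-- ===== CLAIM (what is proved, stated in full; the proofs are below) =====
def Claim_equal_smallestSum : Prop := ∀ (arr : List Int) (k : Int) (num : Int), Dom_smallestSum arr k num → Pre_smallestSum arr k num → Spec_smallestSum arr k num (smallestSum arr k num)

-- ===== LEMMAS AND PROOFS =====

-- shifting a length-kk window one step to the right, Nat-index form
lemma sum_take_drop_shift (arr : List Int) (a kk : Nat) (hk : 1 ≤ kk) (hn : a + kk ≤ arr.length) :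
    ((arr.drop (a + 1)).take kk).sum
      = ((arr.drop a).take kk).sum - arr.getD a 0
        + (if a + kk < arr.length then arr.getD (a + kk) 0 else 0) := by
  have ha : a < arr.length := by omega
  obtain ⟨m, rfl⟩ : ∃ m, kk = m + 1 := ⟨kk - 1, by omega⟩
  have hdrop : arr.drop a = arr[a] :: arr.drop (a + 1) := List.drop_eq_getElem_cons ha
  rw [hdrop, List.take_succ_cons, List.take_add_one]
  by_cases hlt : a + (m + 1) < arr.length
  · have hidx : a + 1 + m = a + (m + 1) := by omega
    have hget : (arr.drop (a + 1))[m]? = some arr[a + (m + 1)] := by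
      rw [List.getElem?_drop, hidx, List.getElem?_eq_getElem hlt]
    rw [hget]
    simp [List.sum_append, List.getD_eq_getElem?_getD, List.getElem?_eq_getElem ha,
      List.getElem?_eq_getElem hlt, if_pos hlt]
  · have hget : (arr.drop (a + 1))[m]? = none := by
      rw [List.getElem?_drop]
      exact List.getElem?_eq_none (by omega)
    rw [hget]
    simp [List.getD_eq_getElem?_getD, List.getElem?_eq_getElem ha, if_neg hlt]

-- the same shift in A's slice/pyGetD terms
lemma window_shift (arr : List Int) (i k : Int) (hi : 0 ≤ i) (hk : 1 ≤ k)
    (hn : i + k ≤ (arr.length : Int)) :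
    (PySem.List.slice arr (some (i + 1)) (some (i + k + 1))).sum
      = (PySem.List.slice arr (some i) (some (i + k))).sum - PySem.List.pyGetD arr i 0
        + (if i + k < (arr.length : Int) then PySem.List.pyGetD arr (i + k) 0 else 0) := by
  have e2 : (i + k + 1).toNat - (i + 1).toNat = k.toNat := by omega
  have e3 : (i + k).toNat - i.toNat = k.toNat := by omega
  have e1 : (i + 1).toNat = i.toNat + 1 := by omega
  rw [PySem.List.slice_toNat arr (show (0:Int) ≤ i + 1 by omega) (show (0:Int) ≤ i + k + 1 by omega),
    PySem.List.slice_toNat arr hi (show (0:Int) ≤ i + k by omega), e2, e3, e1]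
  have hia : i.toNat < arr.length := by omega
  have hg1 : PySem.List.pyGetD arr i 0 = arr[i.toNat] :=
    PySem.List.pyGetD_eq_getElem arr (i := i) 0 hi (by simpa using (by omega : i < (arr.length : Int)))
  rw [sum_take_drop_shift arr i.toNat k.toNat (by omega) (by omega), hg1]
  congr 1
  · congr 1
    rw [List.getD_eq_getElem?_getD, List.getElem?_eq_getElem hia]
    rfl
  · by_cases hlt : i + k < (arr.length : Int)
    · have hlt' : i.toNat + k.toNat < arr.length := by omega
      have hidx : i.toNat + k.toNat = (i + k).toNat := by omega
      have hg2 : PySem.List.pyGetD arr (i + k) 0 = arr[(i + k).toNat] :=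
        PySem.List.pyGetD_eq_getElem arr (i := i + k) 0 (by omega) (by simpa using hlt)
      rw [if_pos hlt', if_pos hlt, hg2, List.getD_eq_getElem?_getD, hidx,
        List.getElem?_eq_getElem (show (i + k).toNat < arr.length by omega)]
      rfl
    · rw [if_neg (by omega), if_neg hlt]

-- A's while-loop equals B's fold, given the incremental window-sum invariant
lemma loop_eq (arr : List Int) (k num : Int) (hk : 1 ≤ k) :
    ∀ (m : Nat) (i sm c0 : Int), 0 ≤ i → ((arr.length : Int) - k + 1 - i).toNat = m →
      smallestSumLoop arr k num i sm c0
        = ((PySem.List.pyRange i ((arr.length : Int) - k + 1) 1).foldl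
            (smallestSumStep arr k num)
            (sm, (PySem.List.slice arr (some i) (some (i + k))).sum)).1 := by
  intro m
  induction m with
  | zero =>
    intro i sm c0 hi hm
    have hstop : ¬ i + (k - 1) < (arr.length : Int) := by omega
    rw [smallestSumLoop, dif_neg hstop,
      PySem.List.pyRange_one_eq_nil (by omega : (arr.length : Int) - k + 1 ≤ i)]
    rfl
  | succ m ih =>
    intro i sm c0 hi hm
    have hlt : i + (k - 1) < (arr.length : Int) := by omega
    rw [smallestSumLoop, dif_pos hlt,
      PySem.List.pyRange_one_cons (by omega : i < (arr.length : Int) - k + 1),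
      List.foldl_cons]
    have hw := window_shift arr i k hi hk (by omega)
    have hstep : smallestSumStep arr k num
        (sm, (PySem.List.slice arr (some i) (some (i + k))).sum) i
        = (if (PySem.List.slice arr (some i) (some (i + k))).sum > num ∧
              (PySem.List.slice arr (some i) (some (i + k))).sum
                < (PySem.List.slice arr (some (i + 1)) (some (i + k + 1))).sum
           then (PySem.List.slice arr (some i) (some (i + k))).sum else sm,
           (PySem.List.slice arr (some (i + 1)) (some (i + 1 + k))).sum) := by
      have e : i + 1 + k = i + k + 1 := by ring
      rw [e]
      simp only [smallestSumStep, Prod.mk.injEq]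
      set N := (if i + k < (arr.length : Int) then PySem.List.pyGetD arr (i + k) 0 else 0) with hN
      constructor
      · exact if_congr (by constructor <;> rintro ⟨h1, h2⟩ <;> exact ⟨h1, by omega⟩) rfl rfl
      · omega
    rw [hstep]
    exact ih (i + 1)
      (if (PySem.List.slice arr (some i) (some (i + k))).sum > num ∧
          (PySem.List.slice arr (some i) (some (i + k))).sum
            < (PySem.List.slice arr (some (i + 1)) (some (i + k + 1))).sum
       then (PySem.List.slice arr (some i) (some (i + k))).sum else sm)
      (PySem.List.slice arr (some i) (some (i + k))).sum (by omega) (by omega)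

-- ===== VERDICT (by name: the statement is the Claim_ definition above) =====
theorem smallestSum_spec : Claim_equal_smallestSum := by
  intro arr k num _ hpre
  have hk : 1 ≤ k := hpre
  unfold Spec_smallestSum smallestSum smallestSum_alt
  rw [if_neg (by omega : ¬ k ≤ 0),
    loop_eq arr k num hk ((arr.length : Int) - k + 1 - 0).toNat 0 0 0 le_rfl rfl]
  simp [zero_add]
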